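-- pv_equiv track=rewrite | github.com/Rhahi/AdventOfCode2018 | 8.py | solve_tree
-- ===== SOURCE A (Python) =====
-- def solve_tree(tree):
--     num_children = tree[0]
--     num_metadata = tree[1]
--
--     head = 2 # size of head
--     size = head + num_metadata # header, metadata
--     child_metadata = []
--     child_size = 0
--
--     for _ in range(num_children):
--         offset, new_metadata = solve_tree(tree[head + child_size:])
--         child_size += offset
--         child_metadata += new_metadata
--
--     size += child_size # header, children, metadata
--     metadata = tree[head+child_size : head+child_size+num_metadata]
--
--     return size, metadata + child_metadata
-- ===== SOURCE B (Python) =====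
-- def solve_tree(tree):
--     # Iterative parse with an explicit stack of [children_left, num_metadata, child_lists]
--     # frames; no recursion and no slice copies of the suffix.
--     stack = []
--     i = 0
--     while True:
--         c, m = tree[i], tree[i + 1]
--         i += 2
--         stack.append([c, m, []])
--         while stack[-1][0] <= 0:
--             _, m0, kids = stack.pop()
--             meta = tree[i:i + m0]
--             i += m0
--             node = meta + [x for kid in kids for x in kid]
--             if not stack:
--                 return i, node
--             stack[-1][0] -= 1
--             stack[-1][2].append(node)
-- ===== Notes on version B (the rewrite author's own statement) =====
-- stated objective: alternative
-- what changed: B replaces A's recursion on slice copies (each child call copies the whole remaining suffix) by a non-recursive single pass that keeps an explicit stack of open frames and one index into the original list.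
-- outside the precondition, e.g. on solve_tree([1, 0, 0, -3, 9, 9, 9]): A returns (1, [9, 9]), B returns (1, [])
import Mathlib
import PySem

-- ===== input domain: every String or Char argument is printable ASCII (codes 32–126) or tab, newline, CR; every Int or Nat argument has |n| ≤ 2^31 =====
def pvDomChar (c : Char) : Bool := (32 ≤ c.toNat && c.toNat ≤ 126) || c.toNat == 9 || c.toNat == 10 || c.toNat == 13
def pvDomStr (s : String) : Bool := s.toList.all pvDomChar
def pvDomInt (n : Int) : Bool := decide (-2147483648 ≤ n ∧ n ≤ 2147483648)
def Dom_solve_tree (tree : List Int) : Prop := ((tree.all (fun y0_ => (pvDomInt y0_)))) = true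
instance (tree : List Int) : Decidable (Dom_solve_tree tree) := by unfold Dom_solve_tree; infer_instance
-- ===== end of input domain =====

-- B replaces A's recursion on slice copies by an iterative parser with an explicit stack of
-- frames and a single index into the original list; equivalence is proved on the inputs
-- Pre_ admits.

-- ===== PORT A =====
-- A's recursion is on ever-shorter slice copies; on ill-formed input Python's recursion is
-- unbounded (RecursionError) or hits an IndexError, so the port carries a fuel parameter,
-- tree.length + 1, which never runs out on inputs satisfying Pre_ (every recursive call
-- drops at least two elements there); the fuel-out and IndexError branches return a junk
-- value (0, []) and are outside Pre_.
def pvSolveA : Nat → List Int → Int × List Int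
  | 0, _ => (0, [])
  | fuel+1, tree =>
    match PySem.List.pyGet? tree 0, PySem.List.pyGet? tree 1 with
    | some num_children, some num_metadata =>
      let head : Int := 2
      let st := (PySem.List.pyRange 0 num_children 1).foldl
        (fun (acc : Int × List Int) _ =>
          let r := pvSolveA fuel (PySem.List.slice tree (some (head + acc.1)) none)
          (acc.1 + r.1, acc.2 ++ r.2))
        (0, ([] : List Int))
      let size := head + num_metadata + st.1
      let metadata := PySem.List.slice tree (some (head + st.1)) (some (head + st.1 + num_metadata))
      (size, metadata ++ st.2)
    | _, _ => (0, [])  -- tree[0] / tree[1] raises IndexError in Python; outside Pre_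

def solve_tree (tree : List Int) : Int × List Int := pvSolveA (tree.length + 1) tree

-- ===== PORT B =====
-- B's inner `while stack[-1][0] <= 0` loop: pops completed frames, building each node's
-- metadata list, until the top frame still expects children (Sum.inr = continue the outer
-- loop) or the last frame completes (Sum.inl = return). The empty-stack case is
-- unreachable from solve_tree_alt (the loop runs only on a just-pushed, nonempty stack).
def pvPopB (tree : List Int) : Int → List (Int × Int × List (List Int)) → (Int × List Int) ⊕ (Int × List (Int × Int × List (List Int)))
  | i, [] => Sum.inr (i, [])
  | i, (c, m, kids) :: rest =>
    if c ≤ 0 then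
      let mdata := PySem.List.slice tree (some i) (some (i + m))
      let node := mdata ++ kids.flatten
      match rest with
      | [] => Sum.inl (i + m, node)
      | (c2, m2, k2) :: rr => pvPopB tree (i + m) ((c2 - 1, m2, k2 ++ [node]) :: rr)
    else Sum.inr (i, (c, m, kids) :: rest)
  termination_by _ stack => stack.length

-- B's outer `while True` loop: read one header, push its frame, run the pop loop. On
-- ill-formed input the Python loop reads out of range (IndexError) or does not terminate,
-- so the port carries fuel tree.length + 1 (each iteration consumes a 2-cell header on
-- inputs satisfying Pre_); fuel-out and IndexError branches return junk, outside Pre_.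
def pvRunB (tree : List Int) : Nat → Int → List (Int × Int × List (List Int)) → Int × List Int
  | 0, i, _ => (i, [])
  | fuel+1, i, stack =>
    match PySem.List.pyGet? tree i, PySem.List.pyGet? tree (i + 1) with
    | some c, some m =>
      match pvPopB tree (i + 2) ((c, m, []) :: stack) with
      | Sum.inl r => r
      | Sum.inr (i', stack') => pvRunB tree fuel i' stack'
    | _, _ => (i, [])

def solve_tree_alt (tree : List Int) : Int × List Int := pvRunB tree (tree.length + 1) 0 []

-- ===== PRECONDITION & SPEC =====
-- Well-formedness of a recursively length-prefixed encoding is itself recursive: pvChkMany fuel k t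
-- checks that k consecutive nodes parse from t without an IndexError and returns the total
-- length they claim; it validates header shape only and computes neither port's output. The
-- first argument is a structural-recursion bound: every recursive call shortens the list by
-- at least two elements, so fuel = tree.length + 1 (as Pre_ passes) never runs out.
def pvChkMany : Nat → Nat → List Int → Option Nat
  | 0, _, _ => none
  | _+1, 0, _ => some 0
  | fuel+1, k+1, c :: m :: rest =>
    if c < 0 ∨ m < 0 then none
    else
      match pvChkMany fuel c.toNat rest with
      | none => none
      | some cs =>
        match pvChkMany fuel k ((c :: m :: rest).drop (2 + cs + m.toNat)) with
        | none => none
        | some rs => some (2 + cs + m.toNat + rs)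
  | _+1, _+1, _ => none

-- Pre_ admits every list whose headers parse as a complete tree (trailing metadata may be
-- shorter than declared: both Pythons slice it identically), and also every list whose root
-- declares no children (neither program recurses there, whatever the entries). It excludes
-- (a) lists on which the parse hits an IndexError or unbounded recursion (A raises there),
-- and (b) child-bearing lists with a negative header field inside, on which A's
-- negative-slice arithmetic on its local slice copies wraps relative to the copy's length —
-- an accident of the slicing implementation no caller of an AoC-8 parser relies on.
def Pre_solve_tree (tree : List Int) : Prop :=
  (pvChkMany (tree.length + 1) 1 tree).isSome = true
  ∨ (2 ≤ tree.length ∧ tree.getD 0 0 ≤ 0)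
instance (tree : List Int) : Decidable (Pre_solve_tree tree) := by
  unfold Pre_solve_tree; infer_instance

def pvWitness_solve_tree : List Int := [2, 3, 0, 3, 10, 11, 12, 1, 1, 0, 1, 99, 2, 1, 1, 2]

def Spec_solve_tree (tree : List Int) (out : Int × List Int) : Prop := out = solve_tree_alt tree
instance (tree : List Int) (out : Int × List Int) : Decidable (Spec_solve_tree tree out) := by
  unfold Spec_solve_tree; infer_instance

-- ===== CLAIM (what is proved, stated in full; the proofs are below) =====
def Claim_equal_solve_tree : Prop :=
  ∀ (tree : List Int), Dom_solve_tree tree → Pre_solve_tree tree →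
    Spec_solve_tree tree (solve_tree tree)

-- ===== LEMMAS AND PROOFS =====

-- proof-side enrichment of the checker: additionally returns the metadata value of the k
-- parsed nodes (own metadata, then the children's, node after node)
def pvChkVal : Nat → Nat → List Int → Option (Nat × List Int)
  | 0, _, _ => none
  | _+1, 0, _ => some (0, [])
  | fuel+1, k+1, c :: m :: rest =>
    if c < 0 ∨ m < 0 then none
    else
      match pvChkVal fuel c.toNat rest with
      | none => none
      | some (cs, cv) =>
        match pvChkVal fuel k ((c :: m :: rest).drop (2 + cs + m.toNat)) with
        | none => none
        | some (rs, rv) =>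
          some (2 + cs + m.toNat + rs, ((rest.drop cs).take m.toNat ++ cv) ++ rv)
  | _+1, _+1, _ => none

theorem pv_chk_iso : ∀ (g k : Nat) (l : List Int),
    pvChkMany g k l = Option.map Prod.fst (pvChkVal g k l) := by
  intro g
  induction g with
  | zero => intro k l; rfl
  | succ g ih =>
    intro k l
    match k, l with
    | 0, l => rfl
    | k+1, [] => rfl
    | k+1, [c] => rfl
    | k+1, c :: m :: rest =>
      simp only [pvChkMany, pvChkVal]
      split_ifs with h
      · rfl
      · rw [ih c.toNat rest]
        cases hv : pvChkVal g c.toNat rest with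
        | none => rfl
        | some p =>
          obtain ⟨cs, cv⟩ := p
          simp only [Option.map_some]
          rw [ih k ((c :: m :: rest).drop (2 + cs + m.toNat))]
          cases hv2 : pvChkVal g k ((c :: m :: rest).drop (2 + cs + m.toNat)) with
          | none => rfl
          | some q => obtain ⟨rs, rv⟩ := q; rfl

theorem pv_chkval_mono : ∀ (g : Nat) (k : Nat) (l : List Int) (r : Nat × List Int),
    pvChkVal g k l = some r → pvChkVal (g + 1) k l = some r := by
  intro g
  induction g with
  | zero => intro k l r h; exact absurd h (by simp [pvChkVal])
  | succ g ih =>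
    intro k l r h
    match k, l with
    | 0, l => exact h
    | k+1, [] => exact absurd h (by simp [pvChkVal])
    | k+1, [c] => exact absurd h (by simp [pvChkVal])
    | k+1, c :: m :: rest =>
      simp only [pvChkVal] at h ⊢
      split_ifs at h ⊢ with hg
      cases hv : pvChkVal g c.toNat rest with
      | none => simp [hv] at h
      | some p =>
        obtain ⟨cs, cv⟩ := p
        simp only [hv] at h
        simp only [ih _ _ _ hv]
        cases hv2 : pvChkVal g k ((c :: m :: rest).drop (2 + cs + m.toNat)) with
        | none => simp [hv2] at h
        | some q =>
          simp only [hv2] at h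
          simp only [ih _ _ _ hv2]
          exact h


theorem pv_foldl_const {α σ : Type} (g : σ → σ) (L : List α) (s : σ) :
    L.foldl (fun a _ => g a) s = g^[L.length] s := by
  induction L generalizing s with
  | nil => rfl
  | cons a L ih => simpa [Function.iterate_succ_apply] using ih (g s)

-- the A-side sibling loop: starting from accumulated child size a and metadata w, parsing k
-- certified nodes advances the size by their total size and appends their values
theorem pv_AMany (tree : List Int) : ∀ (g f k i0 a : Nat) (w : List Int) (s : Nat) (v : List Int),
    pvChkVal g k (tree.drop (i0 + 2 + a)) = some (s, v) → g ≤ f + 1 →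
    (fun (acc : Int × List Int) =>
        (acc.1 + (pvSolveA f (PySem.List.slice (tree.drop i0) (some (2 + acc.1)) none)).1,
         acc.2 ++ (pvSolveA f (PySem.List.slice (tree.drop i0) (some (2 + acc.1)) none)).2))^[k]
      ((a : Int), w)
      = (((a + s : Nat) : Int), w ++ v) := by
  intro g
  induction g with
  | zero => intro f k i0 a w s v h; exact absurd h (by simp [pvChkVal])
  | succ g ih =>
    intro f k i0 a w s v h hg
    match k with
    | 0 =>
      simp only [pvChkVal, Option.some.injEq, Prod.mk.injEq] at h
      obtain ⟨hs, hv⟩ := h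
      simp [← hs, ← hv]
    | k+1 =>
      -- the list must start with a header
      cases hd : tree.drop (i0 + 2 + a) with
      | nil => rw [hd] at h; exact absurd h (by simp [pvChkVal])
      | cons c t =>
        cases t with
        | nil => rw [hd] at h; exact absurd h (by simp [pvChkVal])
        | cons m rest =>
          rw [hd] at h
          simp only [pvChkVal] at h
          split_ifs at h with hguard
          push_neg at hguard
          obtain ⟨hc0, hm0⟩ := hguard
          cases hcv : pvChkVal g c.toNat rest with
          | none => simp [hcv] at h
          | some p =>
            obtain ⟨cs, cv⟩ := p
            simp only [hcv] at h
            cases hrv : pvChkVal g k ((c :: m :: rest).drop (2 + cs + m.toNat)) with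
            | none => simp [hrv] at h
            | some q =>
              obtain ⟨rs, rv⟩ := q
              simp only [hrv, Option.some.injEq, Prod.mk.injEq] at h
              obtain ⟨hs, hv⟩ := h
              -- fuel is positive
              have hg1 : 1 ≤ g := by
                by_contra hgle
                interval_cases g
                · simp [pvChkVal] at hcv
              obtain ⟨f', rfl⟩ : ∃ f', f = f' + 1 := ⟨f - 1, by omega⟩
              -- one step of the iterate
              rw [Function.iterate_succ_apply]
              -- the head node's suffix
              have hsl : PySem.List.slice (tree.drop i0) (some (2 + (a : Int))) none
                  = tree.drop (i0 + 2 + a) := by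
                rw [show (2 + (a : Int)) = ((2 + a : Nat) : Int) by push_cast; ring,
                  PySem.List.slice_from_natCast, List.drop_drop]
                congr 1
                omega
              have e0 : PySem.List.pyGet? (tree.drop (i0 + 2 + a)) 0 = some c := by
                rw [hd]; exact PySem.List.pyGet?_zero_cons c (m :: rest)
              have e1 : PySem.List.pyGet? (tree.drop (i0 + 2 + a)) 1 = some m := by
                rw [hd, show (1 : Int) = ((1 : Nat) : Int) by norm_num,
                  PySem.List.pyGet?_natCast]
                rfl
              have hd2 : tree.drop (i0 + 2 + a + 2) = rest := by
                have h2 := congrArg (List.drop 2) hd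
                rw [List.drop_drop] at h2
                simpa [show 2 + (i0 + 2 + a) = i0 + 2 + a + 2 by omega] using h2
              -- evaluate the head node, using the induction hypothesis for its children
              have hchild := ih f' c.toNat (i0 + 2 + a) 0 [] cs cv
                (by rw [show i0 + 2 + a + 2 + 0 = i0 + 2 + a + 2 by omega, hd2]; exact hcv)
                (by omega)
              have hnode : pvSolveA (f' + 1) (tree.drop (i0 + 2 + a))
                  = (((2 + cs + m.toNat : Nat) : Int), (rest.drop cs).take m.toNat ++ cv) := by
                simp only [pvSolveA, e0, e1]
                rw [pv_foldl_const, PySem.List.length_pyRange_one]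
                simp only [sub_zero]
                simp only [Nat.cast_zero, Nat.zero_add, List.nil_append] at hchild
                rw [hchild]
                have hmeta : PySem.List.slice (tree.drop (i0 + 2 + a))
                    (some (2 + ((cs : Nat) : Int)))
                    (some (2 + ((cs : Nat) : Int) + m))
                    = (rest.drop cs).take m.toNat := by
                  rw [show (2 + ((cs : Nat) : Int)) = ((2 + cs : Nat) : Int) by push_cast; ring,
                    show ((2 + cs : Nat) : Int) + m = ((2 + cs : Nat) : Int) + ((m.toNat : Nat) : Int) by
                      push_cast; omega,
                    PySem.List.slice_natCast_add, hd,
                    show 2 + cs = cs + 1 + 1 by omega,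
                    List.drop_succ_cons, List.drop_succ_cons]
                rw [hmeta]
                simp only [Prod.mk.injEq]
                constructor
                · push_cast; omega
                · simp
              have hbody : ((a : Int)
                      + (pvSolveA (f' + 1) (PySem.List.slice (tree.drop i0)
                          (some (2 + (a : Int))) none)).1,
                    w ++ (pvSolveA (f' + 1) (PySem.List.slice (tree.drop i0)
                          (some (2 + (a : Int))) none)).2)
                  = ((((a + (2 + cs + m.toNat)) : Nat) : Int),
                     w ++ ((rest.drop cs).take m.toNat ++ cv)) := by
                rw [hsl, hnode]
                simp only [Prod.mk.injEq]
                constructor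
                · push_cast; omega
                · trivial
              rw [hbody]
              -- the remaining k siblings
              have htail := ih (f' + 1) k i0 (a + (2 + cs + m.toNat))
                (w ++ ((rest.drop cs).take m.toNat ++ cv)) rs rv
                (by have h2 := congrArg (List.drop (2 + cs + m.toNat)) hd
                    rw [List.drop_drop] at h2
                    rw [show i0 + 2 + (a + (2 + cs + m.toNat))
                      = i0 + 2 + a + (2 + cs + m.toNat) by omega, h2]
                    exact hrv)
                (by omega)
              rw [htail]
              simp only [Prod.mk.injEq]
              constructor
              · push_cast; omega
              · rw [← hv]; simp

-- a single certified node, A-side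
theorem pv_AOne (tree : List Int) : ∀ (g f j s : Nat) (v : List Int),
    pvChkVal g 1 (tree.drop j) = some (s, v) → g ≤ f + 1 →
    pvSolveA f (tree.drop j) = (((s : Nat) : Int), v) := by
  intro g f j s v h hg
  match g, h with
  | g+1, h =>
  cases hd : tree.drop j with
  | nil => rw [hd] at h; exact absurd h (by simp [pvChkVal])
  | cons c t =>
    cases t with
    | nil => rw [hd] at h; exact absurd h (by simp [pvChkVal])
    | cons m rest =>
      rw [hd] at h
      simp only [pvChkVal] at h
      split_ifs at h with hguard
      push_neg at hguard
      obtain ⟨hc0, hm0⟩ := hguard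
      cases hcv : pvChkVal g c.toNat rest with
      | none => simp [hcv] at h
      | some p =>
        obtain ⟨cs, cv⟩ := p
        simp only [hcv] at h
        cases hrv : pvChkVal g 0 ((c :: m :: rest).drop (2 + cs + m.toNat)) with
        | none => simp [hrv] at h
        | some q =>
          obtain ⟨rs, rv⟩ := q
          have hg1 : 1 ≤ g := by
            by_contra hgle
            interval_cases g
            · simp [pvChkVal] at hcv
          have hq : rs = 0 ∧ rv = ([] : List Int) := by
            obtain ⟨g', rfl⟩ : ∃ g', g = g' + 1 := ⟨g - 1, by omega⟩
            simp only [pvChkVal, Option.some.injEq, Prod.mk.injEq] at hrv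
            exact ⟨hrv.1.symm, hrv.2.symm⟩
          obtain ⟨rfl, rfl⟩ := hq
          simp only [hrv, Option.some.injEq, Prod.mk.injEq] at h
          obtain ⟨hs, hv⟩ := h
          obtain ⟨f', rfl⟩ : ∃ f', f = f' + 1 := ⟨f - 1, by omega⟩
          have e0 : PySem.List.pyGet? (tree.drop j) 0 = some c := by
            rw [hd]; exact PySem.List.pyGet?_zero_cons c (m :: rest)
          have e1 : PySem.List.pyGet? (tree.drop j) 1 = some m := by
            rw [hd, show (1 : Int) = ((1 : Nat) : Int) by norm_num, PySem.List.pyGet?_natCast]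
            rfl
          have hd2 : tree.drop (j + 2) = rest := by
            have h2 := congrArg (List.drop 2) hd
            rw [List.drop_drop] at h2
            simpa using h2
          have hchild := pv_AMany tree g f' c.toNat j 0 [] cs cv
            (by rw [show j + 2 + 0 = j + 2 by omega, hd2]; exact hcv) (by omega)
          rw [← hd]
          simp only [pvSolveA, e0, e1]
          rw [pv_foldl_const, PySem.List.length_pyRange_one]
          simp only [sub_zero]
          simp only [Nat.cast_zero, Nat.zero_add, List.nil_append] at hchild
          rw [hchild]
          have hmeta : PySem.List.slice (tree.drop j)
              (some (2 + ((cs : Nat) : Int)))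
              (some (2 + ((cs : Nat) : Int) + m))
              = (rest.drop cs).take m.toNat := by
            rw [show (2 + ((cs : Nat) : Int)) = ((2 + cs : Nat) : Int) by push_cast; ring,
              show ((2 + cs : Nat) : Int) + m = ((2 + cs : Nat) : Int) + ((m.toNat : Nat) : Int) by
                push_cast; omega,
              PySem.List.slice_natCast_add, hd,
              show 2 + cs = cs + 1 + 1 by omega,
              List.drop_succ_cons, List.drop_succ_cons]
          rw [hmeta]
          simp only [Prod.mk.injEq]
          constructor
          · push_cast; omega
          · rw [← hv]; simp

-- denotation of a machine state: the final answer the stack will produce, computed from the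
-- certificates of the children each frame still expects
def pvDen (tree : List Int) (g : Nat) : Nat → List (Int × Int × List (List Int)) → Option (Nat × List Int)
  | _, [] => none
  | i, (c, m, kids) :: rest =>
    match pvChkVal g c.toNat (tree.drop i) with
    | none => none
    | some (cs, cv) =>
      let node := (tree.drop (i + cs)).take m.toNat ++ kids.flatten ++ cv
      let i2 := i + cs + m.toNat
      match rest with
      | [] => some (i2, node)
      | (c2, m2, k2) :: rr => pvDen tree g i2 ((c2 - 1, m2, k2 ++ [node]) :: rr)
  termination_by _ stack => stack.length

theorem pvDen_cons_some (tree : List Int) (g i : Nat) (c m : Int) (kids : List (List Int))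
    (rest : List (Int × Int × List (List Int))) (cs : Nat) (cv : List Int)
    (h : pvChkVal g c.toNat (tree.drop i) = some (cs, cv)) :
    pvDen tree g i ((c, m, kids) :: rest)
      = (match rest with
         | [] => some (i + cs + m.toNat, (tree.drop (i + cs)).take m.toNat ++ kids.flatten ++ cv)
         | (c2, m2, k2) :: rr => pvDen tree g (i + cs + m.toNat)
             ((c2 - 1, m2, k2 ++ [(tree.drop (i + cs)).take m.toNat ++ kids.flatten ++ cv]) :: rr)) := by
  conv_lhs => rw [pvDen]
  rw [h]

theorem pvPopB_cons (tree : List Int) (i : Int) (c m : Int) (kids : List (List Int))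
    (rest : List (Int × Int × List (List Int))) :
    pvPopB tree i ((c, m, kids) :: rest)
      = if c ≤ 0 then
          (match rest with
           | [] => Sum.inl (i + m, PySem.List.slice tree (some i) (some (i + m)) ++ kids.flatten)
           | (c2, m2, k2) :: rr => pvPopB tree (i + m)
               ((c2 - 1, m2, k2 ++ [PySem.List.slice tree (some i) (some (i + m)) ++ kids.flatten]) :: rr))
        else Sum.inr (i, (c, m, kids) :: rest) := by
  conv_lhs => rw [pvPopB]

theorem pvChkVal_zero : ∀ (g : Nat) (l : List Int) (q : Nat × List Int),
    pvChkVal g 0 l = some q → q = (0, ([] : List Int)) := by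
  intro g l q h
  cases g with
  | zero => exact absurd h (by simp [pvChkVal])
  | succ g => simp only [pvChkVal, Option.some.injEq] at h; exact h.symm

-- pushing one header frame onto a live state preserves its denotation
theorem pv_push (tree : List Int) (g0 i : Nat) (c' m' c m : Int)
    (kids : List (List Int)) (rest : List (Int × Int × List (List Int))) (n : Nat) (v : List Int)
    (hdrop : tree.drop i = c' :: m' :: tree.drop (i + 2))
    (hc : 1 ≤ c)
    (h : pvDen tree (g0+1) i ((c, m, kids) :: rest) = some (n, v)) :
    pvDen tree (g0+1) (i + 2) ((c', m', []) :: (c, m, kids) :: rest) = some (n, v) := by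
  cases hcert : pvChkVal (g0+1) c.toNat (tree.drop i) with
  | none =>
    rw [pvDen, hcert] at h
    exact absurd h (by simp)
  | some p =>
    obtain ⟨cs, cv⟩ := p
    rw [pvDen_cons_some _ _ _ _ _ _ _ _ _ hcert] at h
    obtain ⟨ct, hct⟩ : ∃ ct, c.toNat = ct + 1 := ⟨c.toNat - 1, by omega⟩
    rw [hct, hdrop] at hcert
    simp only [pvChkVal] at hcert
    split_ifs at hcert with hgd
    push_neg at hgd
    obtain ⟨hc0', hm0'⟩ := hgd
    cases hcv1 : pvChkVal g0 c'.toNat (tree.drop (i+2)) with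
    | none => simp [hcv1] at hcert
    | some p1 =>
      obtain ⟨cs1, cv1⟩ := p1
      simp only [hcv1] at hcert
      cases hcv2 : pvChkVal g0 ct ((c' :: m' :: tree.drop (i+2)).drop (2 + cs1 + m'.toNat)) with
      | none => simp [hcv2] at hcert
      | some p2 =>
        obtain ⟨rs, rv⟩ := p2
        simp only [hcv2, Option.some.injEq, Prod.mk.injEq] at hcert
        obtain ⟨hcs, hcv⟩ := hcert
        rw [pvDen_cons_some _ _ _ _ _ _ _ _ _ (pv_chkval_mono _ _ _ _ hcv1)]
        have hlist2 : tree.drop (i + 2 + cs1 + m'.toNat)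
            = (c' :: m' :: tree.drop (i+2)).drop (2 + cs1 + m'.toNat) := by
          rw [show 2 + cs1 + m'.toNat = (cs1 + m'.toNat) + 1 + 1 by omega,
            List.drop_succ_cons, List.drop_succ_cons, List.drop_drop]
          congr 1
          omega
        have hcert2 : pvChkVal (g0+1) (c-1).toNat (tree.drop (i + 2 + cs1 + m'.toNat))
            = some (rs, rv) := by
          rw [show (c-1).toNat = ct by omega, hlist2]
          exact pv_chkval_mono _ _ _ _ hcv2
        dsimp only
        rw [pvDen_cons_some _ _ _ _ _ _ _ _ _ hcert2]
        have hnode : (tree.drop (i + 2 + cs1 + m'.toNat + rs)).take m.toNat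
              ++ ((kids ++ [(tree.drop (i + 2 + cs1)).take m'.toNat
                    ++ ([] : List (List Int)).flatten ++ cv1]).flatten) ++ rv
            = (tree.drop (i + cs)).take m.toNat ++ kids.flatten ++ cv := by
          rw [← hcv, show i + 2 + cs1 + m'.toNat + rs = i + cs by omega]
          simp [List.flatten_append, List.append_assoc, List.drop_drop]
        have hi : i + 2 + cs1 + m'.toNat + rs + m.toNat = i + cs + m.toNat := by omega
        rw [hnode, hi]
        exact h

-- the pop cascade follows the denotation: it either returns the denoted answer or stops in
-- a state with the same denotation whose top frame still expects a child
theorem pv_cascade (tree : List Int) (g : Nat) : ∀ (L : Nat)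
    (stack : List (Int × Int × List (List Int))) (i n : Nat) (v : List Int),
    stack.length = L →
    pvDen tree g i stack = some (n, v) →
    (∀ fr ∈ stack, 0 ≤ fr.2.1) →
    (∀ fr ∈ stack.tail, 1 ≤ fr.1) →
    (∃ c0 m0 k0 rest0, stack = (c0, m0, k0) :: rest0 ∧ 0 ≤ c0) →
    pvPopB tree (i : Int) stack = Sum.inl ((n : Int), v)
    ∨ ∃ (i' : Nat) (st' : List (Int × Int × List (List Int))),
        pvPopB tree (i : Int) stack = Sum.inr ((i' : Int), st')
        ∧ pvDen tree g i' st' = some (n, v)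
        ∧ (∀ fr ∈ st', 1 ≤ fr.1 ∧ 0 ≤ fr.2.1)
        ∧ st' ≠ [] ∧ i ≤ i' := by
  intro L
  induction L with
  | zero =>
    intro stack i n v hlen h hm htail hhead
    obtain ⟨c0, m0, k0, rest0, rfl, hc00⟩ := hhead
    simp at hlen
  | succ L ih =>
    intro stack i n v hlen h hm htail hhead
    obtain ⟨c0, m0, k0, rest0, rfl, hc00⟩ := hhead
    by_cases hc0 : c0 ≤ 0
    · -- the top frame is complete: it pops
      cases hcert : pvChkVal g c0.toNat (tree.drop i) with
      | none => rw [pvDen, hcert] at h; exact absurd h (by simp)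
      | some q =>
        rw [pvDen_cons_some _ _ _ _ _ _ _ _ _ hcert] at h
        have hq : q.1 = 0 ∧ q.2 = ([] : List Int) := by
          have := pvChkVal_zero g (tree.drop i) q (by rw [show c0.toNat = 0 by omega] at hcert; exact hcert)
          rw [this]; exact ⟨rfl, rfl⟩
        obtain ⟨q1, q2⟩ := q
        simp only at hq
        obtain ⟨rfl, rfl⟩ := hq
        dsimp only at h
        have hm0 : 0 ≤ m0 := hm (c0, m0, k0) (by simp)
        have hint : (i : Int) + m0 = ((i + m0.toNat : Nat) : Int) := by push_cast; omega
        have hslice : PySem.List.slice tree (some (i : Int)) (some ((i : Int) + m0))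
            = (tree.drop (i + 0)).take m0.toNat := by
          rw [show m0 = ((m0.toNat : Nat) : Int) by omega, PySem.List.slice_natCast_add]
          simp
          rw [max_eq_left hm0]
        rw [pvPopB_cons, if_pos hc0, hslice]
        cases rest0 with
        | nil =>
          left
          simp only [Option.some.injEq, Prod.mk.injEq] at h
          obtain ⟨hn, hv⟩ := h
          rw [hint, ← hn]
          simp only [Sum.inl.injEq, Prod.mk.injEq]
          constructor
          · norm_num
          · rw [← hv]; simp
        | cons fr2 rr =>
          obtain ⟨c2, m2, k2⟩ := fr2
          have hnode : (tree.drop (i + 0)).take m0.toNat ++ k0.flatten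
              = (tree.drop (i + 0)).take m0.toNat ++ k0.flatten ++ ([] : List Int) := by simp
          rw [hint, hnode]
          have := ih ((c2 - 1, m2, k2 ++ [(tree.drop (i + 0)).take m0.toNat ++ k0.flatten ++ ([] : List Int)]) :: rr)
            (i + m0.toNat) n v
            (by simpa using hlen)
            (by rw [show i + m0.toNat = i + 0 + m0.toNat by omega]; exact h)
            (by intro fr hf
                rcases List.mem_cons.mp hf with rfl | hf
                · exact hm ⟨c2, m2, k2⟩ (by simp)
                · exact hm fr (by simp [hf]))
            (by intro fr hf
                have hf' : fr ∈ rr := by simpa using hf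
                exact htail fr (by simp [hf']))
            ⟨c2 - 1, m2, _, rr, rfl, by have := htail ⟨c2, m2, k2⟩ (by simp); omega⟩
          rcases this with hl | ⟨i', st', h1, h2, h3, h4, h5⟩
          · exact Or.inl hl
          · exact Or.inr ⟨i', st', h1, h2, h3, h4, by omega⟩
    · -- the top frame still expects children: stop
      right
      refine ⟨i, (c0, m0, k0) :: rest0, ?_, h, ?_, by simp, le_refl i⟩
      · rw [pvPopB_cons, if_neg hc0]
      · intro fr hf
        rcases List.mem_cons.mp hf with rfl | hf
        · exact ⟨by omega, hm _ (by simp)⟩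
        · exact ⟨htail fr hf, hm fr (by simp [hf])⟩

-- the outer loop computes the denotation of its state
theorem pv_sim (tree : List Int) (g0 : Nat) : ∀ (F : Nat) (i n : Nat)
    (stack : List (Int × Int × List (List Int))) (v : List Int),
    pvDen tree (g0+1) i stack = some (n, v) →
    (∀ fr ∈ stack, 1 ≤ fr.1 ∧ 0 ≤ fr.2.1) →
    stack ≠ [] →
    tree.length < i + 2 * F →
    pvRunB tree F (i : Int) stack = ((n : Int), v) := by
  intro F
  induction F with
  | zero =>
    intro i n stack v h hinv hne hF
    -- impossible: the top frame still expects a child, so a header lies at i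
    obtain ⟨⟨c, m, kids⟩, rest, rfl⟩ : ∃ fr rest, stack = fr :: rest := by
      cases stack with
      | nil => exact absurd rfl hne
      | cons fr rest => exact ⟨fr, rest, rfl⟩
    cases hcert : pvChkVal (g0+1) c.toNat (tree.drop i) with
    | none => rw [pvDen, hcert] at h; exact absurd h (by simp)
    | some q =>
      have hc : 1 ≤ c := (hinv (c, m, kids) (by simp)).1
      obtain ⟨ct, hct⟩ : ∃ ct, c.toNat = ct + 1 := ⟨c.toNat - 1, by omega⟩
      rw [hct] at hcert
      cases hd : tree.drop i with
      | nil => rw [hd] at hcert; exact absurd hcert (by simp [pvChkVal])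
      | cons c' t =>
        cases t with
        | nil => rw [hd] at hcert; exact absurd hcert (by simp [pvChkVal])
        | cons m' rest2 =>
          have hlen := congrArg List.length hd
          simp [List.length_drop] at hlen
          omega
  | succ F ih =>
    intro i n stack v h hinv hne hF
    obtain ⟨⟨c, m, kids⟩, rest, rfl⟩ : ∃ fr rest, stack = fr :: rest := by
      cases stack with
      | nil => exact absurd rfl hne
      | cons fr rest => exact ⟨fr, rest, rfl⟩
    have hc : 1 ≤ c := (hinv (c, m, kids) (by simp)).1
    cases hcert : pvChkVal (g0+1) c.toNat (tree.drop i) with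
    | none => rw [pvDen, hcert] at h; exact absurd h (by simp)
    | some q =>
      obtain ⟨ct, hct⟩ : ∃ ct, c.toNat = ct + 1 := ⟨c.toNat - 1, by omega⟩
      rw [hct] at hcert
      cases hd : tree.drop i with
      | nil => rw [hd] at hcert; exact absurd hcert (by simp [pvChkVal])
      | cons c' t =>
        cases t with
        | nil => rw [hd] at hcert; exact absurd hcert (by simp [pvChkVal])
        | cons m' rest2 =>
          -- header bounds from the certificate's guard
          have hguard : ¬(c' < 0 ∨ m' < 0) := by
            intro hg
            rw [hd] at hcert
            simp only [pvChkVal, if_pos hg] at hcert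
            exact absurd hcert (by simp)
          push_neg at hguard
          obtain ⟨hc0', hm0'⟩ := hguard
          -- the tail of the header is the drop two further on
          have hd2 : tree.drop (i + 2) = rest2 := by
            have h2 := congrArg (List.drop 2) hd
            rw [List.drop_drop] at h2
            simpa using h2
          have hdrop : tree.drop i = c' :: m' :: tree.drop (i + 2) := by rw [hd, hd2]
          -- read the header
          have e0 : PySem.List.pyGet? tree (i : Int) = some c' := by
            rw [PySem.List.pyGet?_natCast]
            have h0 := congrArg (fun (l : List Int) => l[0]?) hd
            simp only [List.getElem?_drop] at h0
            simpa using h0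
          have e1 : PySem.List.pyGet? tree ((i : Int) + 1) = some m' := by
            rw [show ((i : Int) + 1) = ((i + 1 : Nat) : Int) by push_cast; ring,
              PySem.List.pyGet?_natCast]
            have h1 := congrArg (fun (l : List Int) => l[1]?) hd
            simp only [List.getElem?_drop] at h1
            simpa using h1
          simp only [pvRunB, e0, e1]
          -- push the new frame and run the pop cascade
          have hpush := pv_push tree g0 i c' m' c m kids rest n v hdrop hc h
          have hcas := pv_cascade tree (g0+1) (((c', m', []) :: (c, m, kids) :: rest).length)
            ((c', m', []) :: (c, m, kids) :: rest) (i + 2) n v rfl hpush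
            (by intro fr hf
                rcases List.mem_cons.mp hf with rfl | hf
                · exact hm0'
                · exact (hinv fr hf).2)
            (by intro fr hf
                have hf' : fr ∈ (c, m, kids) :: rest := by simpa using hf
                exact (hinv fr hf').1)
            ⟨c', m', [], (c, m, kids) :: rest, rfl, hc0'⟩
          rw [show ((i : Int) + 2) = ((i + 2 : Nat) : Int) by push_cast; ring]
          rcases hcas with hl | ⟨i', st', h1, h2, h3, h4, h5⟩
          · rw [hl]
          · rw [h1]
            exact ih i' n st' v h2 h3 h4 (by omega)

-- a certified tree: run both programs to the certified value
theorem pv_case1 (c' m' : Int) (rest2 : List Int) (s : Nat) (v : List Int)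
    (hval : pvChkVal (rest2.length + 1 + 1 + 1) 1 (c' :: m' :: rest2) = some (s, v)) :
    pvSolveA (rest2.length + 1 + 1 + 1) (c' :: m' :: rest2)
      = pvRunB (c' :: m' :: rest2) (rest2.length + 1 + 1 + 1) 0 [] := by
  -- decompose the top-level certificate
  have hval' := hval
  simp only [pvChkVal] at hval'
  split_ifs at hval' with hguard
  push_neg at hguard
  obtain ⟨hc0', hm0'⟩ := hguard
  cases hcv1 : pvChkVal (rest2.length + 1 + 1) c'.toNat rest2 with
  | none => simp [hcv1] at hval'
  | some p1 =>
    obtain ⟨cs1, cv1⟩ := p1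
    simp only [hcv1] at hval'
    simp only [Option.some.injEq, Prod.mk.injEq] at hval'
    obtain ⟨hs, hv⟩ := hval'
    -- A computes the certified value
    have hA := pv_AOne (c' :: m' :: rest2) (rest2.length + 1 + 1 + 1)
      (rest2.length + 1 + 1 + 1) 0 s v (by simpa using hval) (by omega)
    simp only [List.drop_zero] at hA
    rw [hA]
    -- B: read the root header
    have e0 : PySem.List.pyGet? (c' :: m' :: rest2) (0 : Int) = some c' :=
      PySem.List.pyGet?_zero_cons c' (m' :: rest2)
    have e1 : PySem.List.pyGet? (c' :: m' :: rest2) ((0 : Int) + 1) = some m' := by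
      rw [show ((0 : Int) + 1) = ((1 : Nat) : Int) by norm_num, PySem.List.pyGet?_natCast]
      rfl
    simp only [pvRunB, e0, e1]
    -- the pushed root's denotation is the certified value
    have hden : pvDen (c' :: m' :: rest2) (rest2.length + 1 + 1) 2 [(c', m', [])]
        = some (s, v) := by
      rw [pvDen_cons_some _ _ _ _ _ _ _ _ _
        (show pvChkVal (rest2.length + 1 + 1) c'.toNat ((c' :: m' :: rest2).drop 2)
            = some (cs1, cv1) from hcv1)]
      dsimp only
      simp only [Option.some.injEq, Prod.mk.injEq]
      constructor
      · omega
      · rw [← hv, show (2 : Nat) + cs1 = cs1 + 1 + 1 by omega,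
          List.drop_succ_cons, List.drop_succ_cons]
        simp
    have hcas := pv_cascade (c' :: m' :: rest2) (rest2.length + 1 + 1) 1
      [(c', m', [])] 2 s v rfl hden
      (by intro fr hf
          have : fr = (c', m', ([] : List (List Int))) := by simpa using hf
          rw [this]; exact hm0')
      (by intro fr hf; simp at hf)
      ⟨c', m', [], [], rfl, hc0'⟩
    rw [show ((0 : Int) + 2) = ((2 : Nat) : Int) by norm_num]
    rcases hcas with hl | ⟨i', st', h1, h2, h3, h4, h5⟩
    · rw [hl]
    · rw [h1]
      exact (pv_sim (c' :: m' :: rest2) (rest2.length + 1) (rest2.length + 1 + 1)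
        i' s st' v h2 h3 h4 (by simp [List.length_cons]; omega)).symm

-- a root with no children: neither program recurses, both read the same slice
theorem pv_case2 (c m : Int) (rest : List Int) (hc : c ≤ 0) :
    pvSolveA (rest.length + 1 + 1 + 1) (c :: m :: rest)
      = pvRunB (c :: m :: rest) (rest.length + 1 + 1 + 1) 0 [] := by
  have e0 : PySem.List.pyGet? (c :: m :: rest) (0 : Int) = some c :=
    PySem.List.pyGet?_zero_cons c (m :: rest)
  have e1 : PySem.List.pyGet? (c :: m :: rest) ((0 : Int) + 1) = some m := by
    rw [show ((0 : Int) + 1) = ((1 : Nat) : Int) by norm_num, PySem.List.pyGet?_natCast]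
    rfl
  have e1' : PySem.List.pyGet? (c :: m :: rest) (1 : Int) = some m := by
    rw [show (1 : Int) = ((1 : Nat) : Int) by norm_num, PySem.List.pyGet?_natCast]
    rfl
  simp only [pvSolveA, pvRunB, e0, e1, e1']
  rw [PySem.List.pyRange_one_eq_nil hc, pvPopB_cons, if_pos hc]
  dsimp only [List.foldl]
  norm_num

-- ===== VERDICT (by name: the statement is the Claim_ definition above) =====
theorem solve_tree_spec : Claim_equal_solve_tree := by
  intro tree _ hpre
  unfold Spec_solve_tree solve_tree solve_tree_alt
  rcases hpre with hch | ⟨hlen, hc⟩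
  · -- certified input
    match tree, hch with
    | c' :: m' :: rest2, hch =>
      cases hval : pvChkVal ((c' :: m' :: rest2).length + 1) 1 (c' :: m' :: rest2) with
      | none => rw [pv_chk_iso, hval] at hch; simp at hch
      | some p =>
        obtain ⟨s, v⟩ := p
        have hval' : pvChkVal (rest2.length + 1 + 1 + 1) 1 (c' :: m' :: rest2)
            = some (s, v) := by simpa [List.length_cons] using hval
        have := pv_case1 c' m' rest2 s v hval'
        simpa [List.length_cons] using this
    | [], hch => rw [pv_chk_iso] at hch; simp [pvChkVal] at hch
    | [x], hch => rw [pv_chk_iso] at hch; simp [pvChkVal] at hch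
  · -- a root with no children
    match tree, hlen with
    | c :: m :: rest, _ =>
      have hc' : c ≤ 0 := by simpa using hc
      have := pv_case2 c m rest hc'
      simpa [List.length_cons] using this
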